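-- pv_equiv track=rewrite | github.com/eertan/BootStrap | src/utils.py | get_combo_dict
-- ===== SOURCE A (Python) =====
-- from itertools import combinations, chain
--
-- def get_combo_dict(n=8, mvar=3):
--     dd = dict()
--     gvars = [x + 1 for x in range(n)]
--     for i in gvars:
--         cl = list()
--         for j in range(mvar + 1):
--             if j <= i:
--                 cl.append(list(combinations(list(range(i)), j)))
--                 if len(cl) > 0:
--                     ccl = list(chain(*cl))
--                     cd = dict(zip(list(range(len(ccl))), ccl))
--                     dd.update({str(i) + "_" + str(j): cd})
--     return dd
-- ===== SOURCE B (Python) =====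
-- def get_combo_dict(n=8, mvar=3):
--     dd = {}
--     for i in range(1, n + 1):
--         acc = [()]
--         layer = [()]
--         for j in range(0, min(mvar, i) + 1):
--             if j > 0:
--                 layer = [c + (x,) for c in layer
--                          for x in range(c[-1] + 1 if c else 0, i)]
--                 acc = acc + layer
--             dd[str(i) + "_" + str(j)] = dict(enumerate(acc))
--     return dd
-- ===== Notes on version B (the rewrite author's own statement) =====
-- stated objective: alternative
-- what changed: B keeps one running accumulator per i and generates each size-j combination layer incrementally from the size-(j-1) layer (extending each tuple with every larger element), then stores dict(enumerate(acc)); A calls itertools.combinations afresh for every j and re-chains the whole list-of-lists at every inner step.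
import Mathlib
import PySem

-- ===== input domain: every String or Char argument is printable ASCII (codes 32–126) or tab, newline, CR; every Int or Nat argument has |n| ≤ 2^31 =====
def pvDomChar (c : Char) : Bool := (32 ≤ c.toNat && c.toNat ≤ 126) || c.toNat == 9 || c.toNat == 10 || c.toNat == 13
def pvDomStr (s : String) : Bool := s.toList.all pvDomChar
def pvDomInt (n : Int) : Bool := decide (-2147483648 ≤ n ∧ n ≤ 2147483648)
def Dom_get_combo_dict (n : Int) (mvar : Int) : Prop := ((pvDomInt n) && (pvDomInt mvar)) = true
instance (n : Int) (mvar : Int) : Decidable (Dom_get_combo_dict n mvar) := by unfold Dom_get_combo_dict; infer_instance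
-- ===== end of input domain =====

-- B builds each inner dict from one running accumulator, generating each size-j layer of
-- combinations from the size-(j-1) layer, instead of A's calling itertools.combinations
-- afresh and re-chaining the whole list-of-lists at every inner step.
-- Objective: alternative decomposition (no speed claim).

-- ===== PORT A =====
-- itertools.combinations(range(i), j) on the sorted list range(i), ported by hand
-- (exact: lexicographic order of the j-subsets, as itertools yields them on a sorted list).
def pyCombinations : List Int → Nat → List (List Int)
  | _, 0 => [[]]
  | [], _+1 => []
  | x :: rest, k+1 =>
      (pyCombinations rest k).map (fun c => x :: c) ++ pyCombinations rest (k+1)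

-- body of A's inner 'for j in range(mvar + 1)' loop; state = (cl, dd).
-- dict(zip(range(len(ccl)), ccl)): the keys 0..len-1 are distinct and in order,
-- so the dict is exactly the zipped association list.
def stepA (i : Int) (st : List (List (List Int)) × PySem.Dict String (List (Int × List Int)))
    (j : Int) : List (List (List Int)) × PySem.Dict String (List (Int × List Int)) :=
  if j ≤ i then
    let cl := st.1 ++ [pyCombinations (PySem.List.pyRange 0 i 1) j.toNat]
    if 0 < cl.length then
      let ccl := cl.flatten
      let cd := List.zip (PySem.List.pyRange 0 (ccl.length : Int) 1) ccl
      (cl, st.2.insert (PySem.Int.toStr i ++ "_" ++ PySem.Int.toStr j) cd)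
    else (cl, st.2)
  else st

def get_combo_dict (n : Int) (mvar : Int) : List (String × List (Int × List Int)) :=
  let gvars := (PySem.List.pyRange 0 n 1).map (fun x => x + 1)
  (gvars.foldl
    (fun (dd : PySem.Dict String (List (Int × List Int))) i =>
      ((PySem.List.pyRange 0 (mvar + 1) 1).foldl (stepA i) ([], dd)).2)
    PySem.Dict.empty).items

-- ===== PORT B =====
-- [c + (x,) for c in layer for x in range(c[-1] + 1 if c else 0, i)]
def extendLayer (i : Int) (layer : List (List Int)) : List (List Int) :=
  layer.flatMap (fun c =>
    (PySem.List.pyRange (match c.getLast? with | some x => x + 1 | none => 0) i 1).map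
      (fun x => c ++ [x]))

-- body of B's inner 'for j in range(0, min(mvar, i) + 1)' loop; state = (acc, layer, dd).
def stepB (i : Int)
    (st : List (List Int) × List (List Int) × PySem.Dict String (List (Int × List Int)))
    (j : Int) : List (List Int) × List (List Int) × PySem.Dict String (List (Int × List Int)) :=
  let st' :=
    if 0 < j then
      let layer := extendLayer i st.2.1
      (st.1 ++ layer, layer, st.2.2)
    else st
  (st'.1, st'.2.1,
    st'.2.2.insert (PySem.Int.toStr i ++ "_" ++ PySem.Int.toStr j)
      (PySem.List.enumerate st'.1))

def get_combo_dict_alt (n : Int) (mvar : Int) : List (String × List (Int × List Int)) :=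
  ((PySem.List.pyRange 1 (n + 1) 1).foldl
    (fun (dd : PySem.Dict String (List (Int × List Int))) i =>
      ((PySem.List.pyRange 0 (min mvar i + 1) 1).foldl (stepB i) ([[]], [[]], dd)).2.2)
    PySem.Dict.empty).items

-- ===== PRECONDITION & SPEC =====
def Spec_get_combo_dict (n : Int) (mvar : Int) (out : List (String × List (Int × List Int))) : Prop := out = get_combo_dict_alt n mvar
instance (n : Int) (mvar : Int) (out : List (String × List (Int × List Int))) : Decidable (Spec_get_combo_dict n mvar out) := by unfold Spec_get_combo_dict; infer_instance

-- ===== CLAIM (what is proved, stated in full; the proofs are below) =====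
def Claim_equal_get_combo_dict : Prop := ∀ (n : Int) (mvar : Int), Dom_get_combo_dict n mvar → Spec_get_combo_dict n mvar (get_combo_dict n mvar)

-- ===== LEMMAS AND PROOFS =====

-- extendLayer with a caller-supplied start for the empty prefix (generalization for the
-- induction in extF_comb; at a = 0 it is extendLayer).
def extF (a i : Int) (L : List (List Int)) : List (List Int) :=
  L.flatMap (fun c =>
    (PySem.List.pyRange (match c.getLast? with | some x => x + 1 | none => a) i 1).map
      (fun x => c ++ [x]))

theorem comb_ne_nil : ∀ (xs : List Int) (k : Nat), ∀ c ∈ pyCombinations xs (k+1), c ≠ [] := by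
  intro xs
  induction xs with
  | nil => intro k c hc; simp [pyCombinations] at hc
  | cons x rest ih =>
      intro k c hc
      simp only [pyCombinations, List.mem_append, List.mem_map] at hc
      rcases hc with ⟨c', _, rfl⟩ | hc
      · simp
      · exact ih k c hc

theorem extF_congr (a a' i : Int) (L : List (List Int)) (h : ∀ c ∈ L, c ≠ []) :
    extF a i L = extF a' i L := by
  induction L with
  | nil => rfl
  | cons c L ih =>
      have hc := h c (by simp)
      obtain ⟨y, hy⟩ : ∃ y, c.getLast? = some y := by
        cases hgl : c.getLast? with
        | none => exact absurd (List.getLast?_eq_none_iff.mp hgl) hc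
        | some y => exact ⟨y, rfl⟩
      have ih' := ih (fun c hcL => h c (by simp [hcL]))
      simp only [extF, List.flatMap_cons, hy] at ih' ⊢
      rw [show (List.flatMap _ L : List (List Int)) = List.flatMap _ L from ih']

-- one layer extension turns the size-k layer of combinations of range(a, i) into the
-- size-(k+1) layer, in the same lexicographic order
theorem extF_comb : ∀ (d : Nat) (a i : Int) (k : Nat), (i - a).toNat = d →
    extF a i (pyCombinations (PySem.List.pyRange a i 1) k) =
      pyCombinations (PySem.List.pyRange a i 1) (k+1) := by
  intro d
  induction d with
  | zero =>
      intro a i k hd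
      have hia : i ≤ a := by omega
      rw [PySem.List.pyRange_one_eq_nil hia]
      cases k with
      | zero => simp [extF, pyCombinations, PySem.List.pyRange_one_eq_nil hia]
      | succ k => simp [extF, pyCombinations]
  | succ d ih =>
      intro a i k hd
      have hai : a < i := by omega
      have hR : PySem.List.pyRange a i 1 = a :: PySem.List.pyRange (a+1) i 1 :=
        PySem.List.pyRange_one_cons hai
      have hd' : (i - (a+1)).toNat = d := by omega
      rw [hR]
      cases k with
      | zero =>
          have ihz := ih (a+1) i 0 hd'
          simp only [pyCombinations] at ihz ⊢
          simp only [extF, List.flatMap_cons, List.flatMap_nil, List.getLast?_nil,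
            List.append_nil, List.nil_append, List.map_cons, List.map_nil] at ihz ⊢
          rw [hR, List.map_cons]
          rw [← ihz]
          simp
      | succ k =>
          have ih1 := ih (a+1) i k hd'
          have ih2 := ih (a+1) i (k+1) hd'
          show extF a i ((pyCombinations (PySem.List.pyRange (a+1) i 1) k).map (fun c => a :: c)
              ++ pyCombinations (PySem.List.pyRange (a+1) i 1) (k+1)) =
            (pyCombinations (PySem.List.pyRange (a+1) i 1) (k+1)).map (fun c => a :: c)
              ++ pyCombinations (PySem.List.pyRange (a+1) i 1) (k+2)
          have hpart2 : extF a i (pyCombinations (PySem.List.pyRange (a+1) i 1) (k+1)) =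
              extF (a+1) i (pyCombinations (PySem.List.pyRange (a+1) i 1) (k+1)) :=
            extF_congr a (a+1) i _ (comb_ne_nil _ k)
          have hpart1 : extF a i ((pyCombinations (PySem.List.pyRange (a+1) i 1) k).map
              (fun c => a :: c)) =
              (extF (a+1) i (pyCombinations (PySem.List.pyRange (a+1) i 1) k)).map
                (fun c => a :: c) := by
            simp only [extF, List.flatMap_map, List.map_flatMap, List.map_map]
            apply List.flatMap_congr
            intro c hc
            cases c with
            | nil => simp
            | cons b t =>
                rw [List.getLast?_cons_cons]
                have hy := List.getLast?_eq_some_getLast (l := b :: t) (by simp)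
                rw [hy]
                simp
          simp only [extF] at hpart1 hpart2 ih1 ih2 ⊢
          rw [List.flatMap_append]
          rw [hpart1, hpart2, ih1, ih2]

theorem extF_comb' (i : Int) (k : Nat) :
    extendLayer i (pyCombinations (PySem.List.pyRange 0 i 1) k) =
      pyCombinations (PySem.List.pyRange 0 i 1) (k+1) :=
  extF_comb (i - 0).toNat 0 i k rfl

-- dict(zip(range(len(xs)), xs)) = enumerate(xs)
theorem zip_pyRange_enumerate : ∀ (xs : List (List Int)) (s : Int),
    List.zip (PySem.List.pyRange s (s + xs.length) 1) xs = PySem.List.enumerate xs s := by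
  intro xs
  induction xs with
  | nil => intro s; simp [PySem.List.pyRange_one_eq_nil (le_refl s)]
  | cons x xs ih =>
      intro s
      have h1 : s < s + ((x :: xs).length : Int) := by
        simp only [List.length_cons]; push_cast; omega
      have h2 : s + ((x :: xs).length : Int) = (s+1) + (xs.length : Int) := by
        simp only [List.length_cons]; push_cast; ring
      rw [PySem.List.pyRange_one_cons h1, PySem.List.enumerate_cons]
      simp only [List.zip_cons_cons]
      rw [h2, ih (s+1)]

-- the list-of-layers A has accumulated after step t
def CL (i : Int) (t : Nat) : List (List (List Int)) :=
  (List.range (t+1)).map (fun j => pyCombinations (PySem.List.pyRange 0 i 1) j)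

-- joint invariant of the two inner loops after the steps j = 0 .. t
theorem inner_inv (i : Int) :
    ∀ (t : Nat), (t:Int) ≤ i → ∀ (dd : PySem.Dict String (List (Int × List Int))),
    ∃ d', (PySem.List.pyRange 0 ((t:Int)+1) 1).foldl (stepA i) ([], dd) = (CL i t, d') ∧
      (PySem.List.pyRange 0 ((t:Int)+1) 1).foldl (stepB i) ([[]],[[]],dd) =
        ((CL i t).flatten, pyCombinations (PySem.List.pyRange 0 i 1) t, d') := by
  intro t
  induction t with
  | zero =>
      intro ht dd
      refine ⟨dd.insert (PySem.Int.toStr i ++ "_" ++ PySem.Int.toStr 0)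
        [((0:Int), ([] : List Int))], ?_, ?_⟩
      · show stepA i ([], dd) 0 = _
        have hr01 : PySem.List.pyRange 0 1 1 = [0] := by
          simpa using PySem.List.pyRange_one_singleton (a := (0:Int))
        have ht0 : (0:Int) ≤ i := by exact_mod_cast ht
        simp [stepA, ht0, CL, pyCombinations, List.zip, hr01]
      · show stepB i ([[]],[[]],dd) 0 = _
        simp [stepB, CL, pyCombinations, PySem.List.enumerate]
  | succ t ih =>
      intro ht dd
      have ht' : (t:Int) ≤ i := by push_cast at ht ⊢; omega
      obtain ⟨d', hA, hB⟩ := ih ht' dd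
      have hsplit : PySem.List.pyRange 0 (((t+1:Nat):Int)+1) 1 =
          PySem.List.pyRange 0 ((t:Int)+1) 1 ++ [(t:Int)+1] := by
        have := PySem.List.pyRange_one_succ_right (a := 0) (b := (t:Int)+1) (by omega)
        push_cast
        rw [this]
      rw [hsplit, List.foldl_append, List.foldl_append, hA, hB,
        List.foldl_cons, List.foldl_cons, List.foldl_nil, List.foldl_nil]
      have hCL : CL i (t+1) = CL i t ++ [pyCombinations (PySem.List.pyRange 0 i 1) (t+1)] := by
        simp [CL, List.range_succ]
      have htn : ((t:Int)+1).toNat = t + 1 := by omega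
      refine ⟨d'.insert (PySem.Int.toStr i ++ "_" ++ PySem.Int.toStr ((t:Int)+1))
        (PySem.List.enumerate ((CL i (t+1)).flatten)), ?_, ?_⟩
      · show stepA i (CL i t, d') ((t:Int)+1) = _
        have hguard : (t:Int)+1 ≤ i := by push_cast at ht; omega
        simp only [stepA, if_pos hguard, htn, ← hCL]
        have hz : (0:Int) + ((CL i (t+1)).flatten.length : Int) =
            ((CL i (t+1)).flatten.length : Int) := by ring
        rw [if_pos (by simp [hCL])]
        rw [show List.zip (PySem.List.pyRange 0 ((CL i (t+1)).flatten.length : Int) 1)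
              (CL i (t+1)).flatten = PySem.List.enumerate ((CL i (t+1)).flatten) from by
          rw [← hz]; exact zip_pyRange_enumerate _ 0]
      · show stepB i ((CL i t).flatten, pyCombinations (PySem.List.pyRange 0 i 1) t, d')
            ((t:Int)+1) = _
        have hlayer : extendLayer i (pyCombinations (PySem.List.pyRange 0 i 1) t) =
            pyCombinations (PySem.List.pyRange 0 i 1) (t+1) := extF_comb' i t
        simp only [stepB, if_pos (show (0:Int) < (t:Int)+1 by omega), hlayer, hCL]
        simp

-- steps with j > i do nothing in A's loop
theorem stepA_tail (i : Int) : ∀ (l : List Int), (∀ j ∈ l, i < j) →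
    ∀ st, l.foldl (stepA i) st = st := by
  intro l
  induction l with
  | nil => intro _ st; rfl
  | cons j l ih =>
      intro h st
      have hj : i < j := h j (by simp)
      rw [List.foldl_cons, show stepA i st j = st from by simp [stepA, not_le.mpr hj]]
      exact ih (fun j hj => h j (by simp [hj])) st

-- the two inner loops produce the same dict, for any i ≥ 1
theorem inner_eq (mvar i : Int) (hi : 1 ≤ i)
    (dd : PySem.Dict String (List (Int × List Int))) :
    ((PySem.List.pyRange 0 (mvar+1) 1).foldl (stepA i) ([], dd)).2 =
    ((PySem.List.pyRange 0 (min mvar i + 1) 1).foldl (stepB i) ([[]],[[]],dd)).2.2 := by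
  by_cases hm : mvar < 0
  · have hmin : min mvar i = mvar := min_eq_left (by omega)
    rw [hmin, PySem.List.pyRange_one_eq_nil (by omega)]
    rfl
  · rw [not_lt] at hm
    have hm0 : 0 ≤ min mvar i := le_min hm (by omega)
    have hmi : min mvar i ≤ i := min_le_right _ _
    have hmm : min mvar i ≤ mvar := min_le_left _ _
    have htm : ((min mvar i).toNat : Int) = min mvar i := Int.toNat_of_nonneg hm0
    obtain ⟨d', hA, hB⟩ := inner_inv i (min mvar i).toNat (by rw [htm]; exact hmi) dd
    have hsplitA : PySem.List.pyRange 0 (mvar+1) 1 =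
        PySem.List.pyRange 0 (min mvar i + 1) 1 ++
          PySem.List.pyRange (min mvar i + 1) (mvar+1) 1 :=
      PySem.List.pyRange_one_append _ _ _ (by omega) (by omega)
    have hcast : PySem.List.pyRange 0 (min mvar i + 1) 1 =
        PySem.List.pyRange 0 (((min mvar i).toNat : Int) + 1) 1 := by rw [htm]
    have htail : ∀ j ∈ PySem.List.pyRange (min mvar i + 1) (mvar+1) 1, i < j := by
      intro j hj
      rw [PySem.List.mem_pyRange_one] at hj
      rcases min_choice mvar i with h | h
      · omega
      · omega
    rw [hsplitA, List.foldl_append, hcast, hA, stepA_tail i _ htail, hB]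

-- range(1, n+1) is range(n) shifted by one
theorem range_shift (n : Int) :
    PySem.List.pyRange 1 (n+1) 1 = (PySem.List.pyRange 0 n 1).map (fun x => x + 1) := by
  rw [PySem.List.pyRange_one, PySem.List.pyRange_one, List.map_map]
  have : n + 1 - 1 = n - 0 := by ring
  rw [this]
  apply List.map_congr_left
  intro k _
  simp [Function.comp]
  ring

-- ===== VERDICT (by name: the statement is the Claim_ definition above) =====
theorem get_combo_dict_spec : Claim_equal_get_combo_dict := by
  intro n mvar _
  unfold Spec_get_combo_dict get_combo_dict get_combo_dict_alt
  rw [range_shift]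
  refine congrArg PySem.Dict.items (PySem.List.foldl_congr_mem _ _ _ _ ?_)
  intro dd x hx
  rcases List.mem_map.mp hx with ⟨y, hy, rfl⟩
  have : 0 ≤ y := (PySem.List.mem_pyRange_one.mp hy).1
  exact inner_eq mvar (y+1) (by omega) dd
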